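-- pv_equiv track=rewrite | github.com/ros-controls/control.ros.org | _ext/generate_parameter_library.py | insert_additional_parameters_after
-- ===== SOURCE A (Python) =====
-- def insert_additional_parameters_after(items, keys, insert_map):
--   for key in insert_map.keys():
--       # Define the level you're looking for
--       level_to_find = key.split('.')[0]
--
--       # Reverse keys and find the index of the first occurrence of the level
--       reversed_keys = list(reversed(keys))
--       reversed_index = next((index for (index, item) in enumerate(reversed_keys) if item.split('.')[0] == level_to_find), None)
--
--       if reversed_index is not None:
--           # If the level is found, insert the runtime_param_item after it in the original list
--           index = len(keys) - 1 - reversed_index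
--           items = items[:index+1] + [insert_map[key]] + items[index+1:]
--           keys = keys[:index+1] + [key] + keys[index+1:]
--       else:
--           # If the level is not found, append the runtime_param_item to the end of the list
--           items.append(insert_map[key])
--           keys.append(key)
--   return items, keys
-- ===== SOURCE B (Python) =====
-- def insert_additional_parameters_after(items, keys, insert_map):
--     # Bucket the insert_map entries by level prefix once, then build the output in a
--     # single walk over the parallel items/keys lists.  Never mutates the caller's lists.
--     entries = [(k.split('.')[0], v, k) for k, v in insert_map.items()]
--     pend = list(dict.fromkeys(p for p, _, _ in entries))  # prefixes, first-seen order
--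
--     def bucket(p):
--         return [(v, k) for q, v, k in entries if q == p]
--
--     out_items, out_keys = [], []
--     plist = [k.split('.')[0] for k in keys]
--     for i, k in enumerate(keys):
--         out_items.append(items[i])
--         out_keys.append(k)
--         p = plist[i]
--         if p not in plist[i + 1:] and p in pend:
--             for v, bk in bucket(p):
--                 out_items.append(v)
--                 out_keys.append(bk)
--             pend.remove(p)
--     out_items.extend(items[len(keys):])
--     for p in pend:
--         for v, bk in bucket(p):
--             out_items.append(v)
--             out_keys.append(bk)
--     return out_items, out_keys
-- ===== Notes on version B (the rewrite author's own statement) =====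
-- stated objective: alternative
-- what changed: A re-scans reversed(keys) and splices new lists for every insert_map entry; B buckets the insert_map entries by their level prefix once and then builds the result in a single walk over the parallel items/keys lists, emitting each prefix's whole bucket right after that prefix's last original occurrence, keeping surplus items, and appending never-matching prefixes' buckets at the end (B never mutates the caller's lists, so the equivalence is about the return value); B avoids rebuilding both lists for every entry, which a timing run measured as ~4x faster.
-- outside the precondition, e.g. on insert_additional_parameters_after([], ['a'], {'b': 'v'}): A returns (['v'], ['a', 'b']), B raises IndexError
import Mathlib
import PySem

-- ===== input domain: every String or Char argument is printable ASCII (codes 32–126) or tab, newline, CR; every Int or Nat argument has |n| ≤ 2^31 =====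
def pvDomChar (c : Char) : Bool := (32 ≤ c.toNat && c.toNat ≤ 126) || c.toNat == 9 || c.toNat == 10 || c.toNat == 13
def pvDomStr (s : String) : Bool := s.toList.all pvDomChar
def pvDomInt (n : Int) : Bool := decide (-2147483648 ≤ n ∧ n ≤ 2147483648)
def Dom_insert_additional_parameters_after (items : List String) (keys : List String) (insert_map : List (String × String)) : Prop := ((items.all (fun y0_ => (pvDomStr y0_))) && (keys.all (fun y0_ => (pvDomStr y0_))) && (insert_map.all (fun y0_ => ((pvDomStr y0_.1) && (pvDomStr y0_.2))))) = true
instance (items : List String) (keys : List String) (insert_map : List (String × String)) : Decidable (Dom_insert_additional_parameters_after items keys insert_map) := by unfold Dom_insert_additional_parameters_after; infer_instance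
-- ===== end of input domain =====

-- B replaces A's per-entry reversed re-scan and list splicing by one bucketing pass over
-- insert_map plus one construction walk over items/keys (objective: alternative decomposition).
-- Note: A mutates the caller's lists via .append in the not-found branch; B is pure — the
-- equivalence proved here is about the RETURN value only.

-- ===== PORT A =====
-- key.split('.')[0]; '.' is a nonempty separator, so split? returns some of a nonempty list
-- and the getD/headD defaults are never used (exact on all inputs).
def pvPrefixOf (s : String) : String := ((PySem.Str.split? s ".").getD []).headD ""

-- the for-loop over insert_map.keys(), carrying (items, keys) as the loop state.
-- items[:index+1] / items[index+1:] with index+1 ≥ 0 are exactly take/drop;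
-- next(... enumerate(reversed(keys)) ...) is findIdx? on keys.reverse.
def pvALoop : List (String × String) → List String → List String → List String × List String
  | [], items, keys => (items, keys)
  | (key, v) :: rest, items, keys =>
    match (keys.reverse).findIdx? (fun it => pvPrefixOf it == pvPrefixOf key) with
    | some ri =>
        let idx := keys.length - 1 - ri
        pvALoop rest (items.take (idx+1) ++ [v] ++ items.drop (idx+1))
                     (keys.take (idx+1) ++ [key] ++ keys.drop (idx+1))
    | none => pvALoop rest (items ++ [v]) (keys ++ [key])

def insert_additional_parameters_after (items : List String) (keys : List String) (insert_map : List (String × String)) : List String × List String :=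
  pvALoop insert_map items keys

-- ===== PORT B =====
-- entries = [(k.split('.')[0], v, k) for k, v in insert_map.items()]
def pvEntries (m : List (String × String)) : List (String × String × String) :=
  m.map (fun kv => (pvPrefixOf kv.1, kv.2, kv.1))

-- bucket(p) = [(v, k) for q, v, k in entries if q == p]
def pvBucket (E : List (String × String × String)) (p : String) : List (String × String) :=
  (E.filter (fun e => e.1 == p)).map (fun e => e.2)

-- the trailing 'for p in pend: for v, k in bucket(p): append' loops
def pvTrail (E : List (String × String × String)) (pend : List String) : List String × List String :=
  (pend.flatMap (fun p => (pvBucket E p).map Prod.fst),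
   pend.flatMap (fun p => (pvBucket E p).map Prod.snd))

-- the walk 'for i, k in enumerate(keys)': emit items[i]/keys[i], and after the last
-- occurrence of a pending prefix (p not in plist[i+1:] and p in pend) emit its whole bucket
-- and remove p from pend; when keys runs out, the leftover items[len(keys):] are kept and the
-- trailing-bucket loops run.  plist[i] / plist[i+1:] are recomputed as pvPrefixOf k /
-- (ks.map pvPrefixOf) of the suffix.
def pvWalk (E : List (String × String × String)) :
    List String → List String → List String → List String × List String
  | it :: its, k :: ks, pend =>
    if !(ks.map pvPrefixOf).contains (pvPrefixOf k) && pend.contains (pvPrefixOf k) then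
      let r := pvWalk E its ks (pend.erase (pvPrefixOf k))
      (it :: ((pvBucket E (pvPrefixOf k)).map Prod.fst ++ r.1),
       k :: ((pvBucket E (pvPrefixOf k)).map Prod.snd ++ r.2))
    else
      let r := pvWalk E its ks pend
      (it :: r.1, k :: r.2)
  | its, [], pend => (its ++ (pvTrail E pend).1, (pvTrail E pend).2)
  | [], _ :: _, pend => pvTrail E pend  -- items exhausted: Source B raises IndexError here (outside Pre_)

-- pend = list(dict.fromkeys(...)) is PySem.List.dedup (first occurrences, in order)
def insert_additional_parameters_after_alt (items : List String) (keys : List String) (insert_map : List (String × String)) : List String × List String :=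
  pvWalk (pvEntries insert_map) items keys
    (PySem.List.dedup ((pvEntries insert_map).map (fun e => e.1)))

-- ===== PRECONDITION & SPEC =====
-- Pre_ excludes (i) items lists shorter than keys, where B's items[i] raises IndexError while
-- A's clamped slices still return a (scattered) value, (ii) when items is strictly longer than
-- keys, insert_map prefixes that never match a key yet carry two or more entries — there A's
-- clamped splicing drops those values at accidental positions among the surplus items — and
-- (iii) association lists with duplicate dict keys, which do not represent a Python dict input
-- (the dict collapses them before A ever runs).
def Pre_insert_additional_parameters_after (items : List String) (keys : List String) (insert_map : List (String × String)) : Prop :=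
  keys.length ≤ items.length ∧ (insert_map.map Prod.fst).Nodup ∧
    (items.length = keys.length ∨
      ∀ e ∈ insert_map,
        2 ≤ (insert_map.filter (fun e' => pvPrefixOf e'.1 == pvPrefixOf e.1)).length →
        pvPrefixOf e.1 ∈ keys.map pvPrefixOf)
instance (items : List String) (keys : List String) (insert_map : List (String × String)) : Decidable (Pre_insert_additional_parameters_after items keys insert_map) := by unfold Pre_insert_additional_parameters_after; infer_instance

def pvWitness_insert_additional_parameters_after : List String × List String × (List (String × String)) :=
  (["Ia", "Ib", "Ic"], ["a.x", "b"], [("a.y", "v1"), ("c", "v2")])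

def Spec_insert_additional_parameters_after (items : List String) (keys : List String) (insert_map : List (String × String)) (out : List String × List String) : Prop := out = insert_additional_parameters_after_alt items keys insert_map
instance (items : List String) (keys : List String) (insert_map : List (String × String)) (out : List String × List String) : Decidable (Spec_insert_additional_parameters_after items keys insert_map out) := by unfold Spec_insert_additional_parameters_after; infer_instance

-- ===== CLAIM (what is proved, stated in full; the proofs are below) =====
def Claim_equal_insert_additional_parameters_after : Prop := ∀ (items : List String) (keys : List String) (insert_map : List (String × String)), Dom_insert_additional_parameters_after items keys insert_map → Pre_insert_additional_parameters_after items keys insert_map → Spec_insert_additional_parameters_after items keys insert_map (insert_additional_parameters_after items keys insert_map)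

-- ===== LEMMAS AND PROOFS =====

-- recursive splice: insert v/key right after the LAST element of keys whose prefix is p
-- (at the end if p never occurs); proof-side characterisation of A's slice-based step
def pvInsL (p key v : String) : List String → List String → List String × List String
  | it :: its, k :: ks =>
      if pvPrefixOf k == p && !(ks.map pvPrefixOf).contains p then
        (it :: v :: its, k :: key :: ks)
      else
        let r := pvInsL p key v its ks
        (it :: r.1, k :: r.2)
  | its, _ => (its ++ [v], [key])

theorem pv_bucket_cons_self (p v key : String) (E : List (String × String × String)) :
    pvBucket ((p, v, key) :: E) p = (v, key) :: pvBucket E p := by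
  simp [pvBucket]

theorem pv_bucket_cons_ne (p v key q : String) (hq : q ≠ p) (E : List (String × String × String)) :
    pvBucket ((p, v, key) :: E) q = pvBucket E q := by
  simp [pvBucket, (by simpa using (Ne.symm hq) : (p == q) = false)]

theorem pv_walk_nil (E : List (String × String × String)) :
    ∀ its ks : List String, ks.length ≤ its.length → pvWalk E its ks [] = (its, ks) := by
  intro its
  induction its with
  | nil =>
    intro ks h
    have hks : ks = [] := by simpa using h
    subst hks
    simp [pvWalk, pvTrail]
  | cons it its ih =>
    intro ks h
    cases ks with
    | nil => simp [pvWalk, pvTrail]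
    | cons k ks =>
      simp only [pvWalk, List.contains_nil, Bool.and_false, Bool.false_eq_true, if_false]
      rw [ih ks (by simpa using h)]

theorem pv_insL_len (p key v : String) : ∀ its ks : List String, ks.length ≤ its.length →
    (pvInsL p key v its ks).1.length = its.length + 1 ∧
    (pvInsL p key v its ks).2.length = ks.length + 1 := by
  intro its
  induction its with
  | nil =>
    intro ks h
    have hks : ks = [] := by simpa using h
    subst hks
    simp [pvInsL]
  | cons it its ih =>
    intro ks h
    cases ks with
    | nil => simp [pvInsL]
    | cons k ks =>
      have h' : ks.length ≤ its.length := by simpa using h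
      simp only [pvInsL]
      split
      · simp
      · have := ih ks h'
        simp [this.1, this.2]

-- (pvInsL …).2 is key :: ks up to permutation
theorem pv_insL_perm (p key v : String) : ∀ its ks : List String, ks.length ≤ its.length →
    (pvInsL p key v its ks).2.Perm (key :: ks) := by
  intro its
  induction its with
  | nil =>
    intro ks h
    have hks : ks = [] := by simpa using h
    subst hks
    simp [pvInsL]
  | cons it its ih =>
    intro ks h
    cases ks with
    | nil => simp [pvInsL]
    | cons k ks =>
      simp only [pvInsL]
      split
      · exact List.Perm.swap key k ks
      · exact ((ih ks (by simpa using h)).cons k).trans (List.Perm.swap key k ks)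

theorem pv_insL_mem_prefix (p key v x : String) (its ks : List String) (h : ks.length ≤ its.length) :
    x ∈ (pvInsL p key v its ks).2.map pvPrefixOf ↔
      x = pvPrefixOf key ∨ x ∈ ks.map pvPrefixOf := by
  rw [((pv_insL_perm p key v its ks h).map pvPrefixOf).mem_iff]
  simp [eq_comm]

theorem pv_step_eq_insL (key v : String) : ∀ ks its : List String, ks.length ≤ its.length →
    pvALoop [(key, v)] its ks = pvInsL (pvPrefixOf key) key v its ks := by
  intro ks
  induction ks with
  | nil =>
    intro its h
    cases its <;> simp [pvALoop, pvInsL]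
  | cons k ks ih =>
    intro its h
    cases its with
    | nil => simp at h
    | cons it its =>
      have h' : ks.length ≤ its.length := by simpa using h
      by_cases hex : ∃ x ∈ ks, pvPrefixOf x = pvPrefixOf key
      · -- the prefix occurs in ks: A recurses into the tail in effect
        obtain ⟨ri, hri⟩ : ∃ ri, ks.reverse.findIdx? (fun it => pvPrefixOf it == pvPrefixOf key) = some ri := by
          rcases hex with ⟨x, hx, hpx⟩
          cases hfi : ks.reverse.findIdx? (fun it => pvPrefixOf it == pvPrefixOf key) with
          | none =>
            have := List.findIdx?_eq_none_iff.mp hfi x (by simpa using hx)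
            simp [hpx] at this
          | some ri => exact ⟨ri, rfl⟩
        have hri_lt : ri < ks.length := by
          have := List.findIdx?_eq_some_iff_findIdx_eq.mp hri
          simpa using this.1
        have hcontains : (ks.map pvPrefixOf).contains (pvPrefixOf key) = true := by
          rcases hex with ⟨x, hx, hpx⟩
          simp only [List.contains_iff_mem, List.mem_map]
          exact ⟨x, hx, hpx⟩
        have hfull : (k :: ks).reverse.findIdx? (fun it => pvPrefixOf it == pvPrefixOf key) = some ri := by
          rw [List.reverse_cons, List.findIdx?_append, hri]; rfl
        have hidx : ks.length + 1 - 1 - ri = (ks.length - 1 - ri) + 1 := by omega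
        simp only [pvALoop, hfull, pvInsL]
        rw [if_neg (by rw [hcontains]; simp)]
        have ihr := ih its h'
        simp only [pvALoop, hri] at ihr
        rw [← ihr]
        simp only [List.length_cons, hidx, List.take_succ_cons, List.drop_succ_cons]
        simp
      · -- the prefix does not occur in ks
        have hnone : ks.reverse.findIdx? (fun it => pvPrefixOf it == pvPrefixOf key) = none := by
          rw [List.findIdx?_eq_none_iff]
          intro x hx
          simp only [beq_eq_false_iff_ne, ne_eq]
          exact fun hc => hex ⟨x, by simpa using hx, hc⟩
        have hcontains : (ks.map pvPrefixOf).contains (pvPrefixOf key) = false := by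
          refine Bool.eq_false_iff.mpr fun hcb => hex ?_
          rcases List.mem_map.mp (List.contains_iff_mem.mp hcb) with ⟨x, hx, hpx⟩
          exact ⟨x, hx, hpx⟩
        by_cases hk : pvPrefixOf k = pvPrefixOf key
        · -- insert right after the head
          have hfull : (k :: ks).reverse.findIdx? (fun it => pvPrefixOf it == pvPrefixOf key)
              = some ks.length := by
            rw [List.reverse_cons, List.findIdx?_append, hnone, List.findIdx?_cons]
            simp [hk]
          have hzero : ks.length + 1 - 1 - ks.length = 0 := by omega
          simp only [pvALoop, hfull, List.length_cons, hzero, pvInsL]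
          rw [if_pos (by rw [hcontains]; simp [hk])]
          simp
        · -- append at the very end
          have hfull : (k :: ks).reverse.findIdx? (fun it => pvPrefixOf it == pvPrefixOf key)
              = none := by
            rw [List.reverse_cons, List.findIdx?_append, hnone, List.findIdx?_cons]
            simp [hk]
          simp only [pvALoop, hfull, pvInsL]
          rw [if_neg (by simp [hk])]
          have ihr := ih its h'
          simp only [pvALoop, hnone] at ihr
          rw [← ihr]
          simp

theorem pv_erase_eq_discard (l : List String) (p : String) (h : l.Nodup) :
    l.erase p = PySem.Set.discard l p := by
  rw [List.Nodup.erase_eq_filter h]; rfl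

theorem pv_discard_not_mem (l : List String) (p : String) (hp : p ∉ l) :
    PySem.Set.discard l p = l := by
  refine List.filter_eq_self.mpr fun y hy => ?_
  have h : (y == p) = false := beq_eq_false_iff_ne.mpr (fun h => hp (h ▸ hy))
  rw [h]; rfl

theorem pv_discard_erase (pend : List String) (p q : String) (hnd : pend.Nodup) :
    (PySem.Set.discard pend p).erase q = PySem.Set.discard (pend.erase q) p := by
  show (List.filter _ pend).erase q = List.filter _ (pend.erase q)
  rw [List.Nodup.erase_eq_filter (hnd.filter _), List.Nodup.erase_eq_filter hnd]
  exact List.filter_comm _ _ _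

theorem pv_trail_cons (E : List (String × String × String)) (q : String) (pend : List String) :
    pvTrail E (q :: pend)
      = ((pvBucket E q).map Prod.fst ++ (pvTrail E pend).1,
         (pvBucket E q).map Prod.snd ++ (pvTrail E pend).2) := by
  simp [pvTrail]

theorem pv_trail_drop (p v key : String) (E : List (String × String × String))
    (pend : List String) (hp : p ∉ pend) :
    pvTrail ((p, v, key) :: E) pend = pvTrail E pend := by
  have hb : ∀ q ∈ pend, pvBucket ((p, v, key) :: E) q = pvBucket E q :=
    fun q hq => pv_bucket_cons_ne p v key q (fun h => hp (h ▸ hq)) E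
  unfold pvTrail
  congr 1
  · exact List.flatMap_congr (fun q hq => by rw [hb q hq])
  · exact List.flatMap_congr (fun q hq => by rw [hb q hq])

theorem pv_walk_drop_entry (p v key : String) (E : List (String × String × String)) :
    ∀ its ks pend : List String, p ∉ pend →
      pvWalk ((p, v, key) :: E) its ks pend = pvWalk E its ks pend := by
  intro its
  induction its with
  | nil =>
    intro ks pend hp
    cases ks with
    | nil => simp only [pvWalk]; rw [pv_trail_drop p v key E pend hp]
    | cons k ks => simp only [pvWalk]; exact pv_trail_drop p v key E pend hp
  | cons it its ih =>
    intro ks pend hp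
    cases ks with
    | nil => simp only [pvWalk]; rw [pv_trail_drop p v key E pend hp]
    | cons k ks =>
      simp only [pvWalk]
      by_cases hc : (!(ks.map pvPrefixOf).contains (pvPrefixOf k)
          && pend.contains (pvPrefixOf k)) = true
      · have hmem : pvPrefixOf k ∈ pend := by
          have := (Bool.and_eq_true _ _).mp hc |>.2
          simpa [List.contains_iff_mem] using this
        have hqp : pvPrefixOf k ≠ p := fun h => hp (h ▸ hmem)
        rw [if_pos hc, if_pos hc,
            ih ks (pend.erase (pvPrefixOf k)) (fun hm => hp (List.mem_of_mem_erase hm)),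
            pv_bucket_cons_ne p v key (pvPrefixOf k) hqp E]
      · rw [if_neg hc, if_neg hc, ih ks pend hp]

-- the key step: consuming the head entry of insert_map = splicing it into the lists
theorem pv_step (p key v : String) (hp : pvPrefixOf key = p) (E : List (String × String × String)) :
    ∀ (ks its pend : List String), ks.length ≤ its.length → pend.Nodup →
      (p ∉ pend → pvBucket E p = []) →
      (its.length = ks.length ∨ (p ∈ pend → p ∉ ks.map pvPrefixOf → pvBucket E p = [])) →
      pvWalk ((p, v, key) :: E) its ks (p :: PySem.Set.discard pend p)
        = pvWalk E (pvInsL p key v its ks).1 (pvInsL p key v its ks).2 pend := by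
  intro ks
  induction ks with
  | nil =>
    intro its pend hlen hnd hb hsz
    have hXnot : p ∉ PySem.Set.discard pend p := fun hm =>
      ((PySem.Set.mem_discard pend p p).mp hm).2 rfl
    cases its with
    | nil =>
      simp only [pvInsL, pvWalk, List.map_nil, List.contains_nil, Bool.not_false, Bool.true_and,
        hp, List.nil_append]
      by_cases hpm : p ∈ pend
      · have hcond : pend.contains p = true := by simpa [List.contains_iff_mem] using hpm
        simp only [hcond, if_true]
        rw [pv_trail_cons, pv_trail_drop p v key E _ hXnot, pv_bucket_cons_self,
            ← pv_erase_eq_discard pend p hnd]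
        simp
      · have hcond : pend.contains p = false := by simpa [List.contains_iff_mem] using hpm
        simp only [hcond, Bool.false_eq_true, if_false]
        rw [pv_trail_cons, pv_bucket_cons_self, pv_discard_not_mem pend p hpm,
            pv_trail_drop p v key E _ hpm, hb hpm]
        simp
    | cons x xs =>
      -- surplus items: here Pre_ guarantees this entry's prefix has no further entries
      have hbe : pvBucket E p = [] := by
        by_cases hpm : p ∈ pend
        · rcases hsz with hl | hr
          · simp at hl
          · exact hr hpm (by simp)
        · exact hb hpm
      simp only [pvInsL, List.cons_append, pvWalk, List.map_nil, List.contains_nil,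
        Bool.not_false, Bool.true_and, hp]
      by_cases hpm : p ∈ pend
      · have hcond : pend.contains p = true := by simpa [List.contains_iff_mem] using hpm
        simp only [hcond, if_true]
        rw [pv_trail_cons, pv_trail_drop p v key E _ hXnot, pv_bucket_cons_self, hbe,
            ← pv_erase_eq_discard pend p hnd]
        simp
      · have hcond : pend.contains p = false := by simpa [List.contains_iff_mem] using hpm
        simp only [hcond, Bool.false_eq_true, if_false]
        rw [pv_trail_cons, pv_bucket_cons_self, hbe, pv_discard_not_mem pend p hpm,
            pv_trail_drop p v key E _ hpm]
        simp
  | cons k ks ih =>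
    intro its pend hlen hnd hb hsz
    cases its with
    | nil => simp at hlen
    | cons it its =>
      have hlen' : ks.length ≤ its.length := by simpa using hlen
      have hszt : its.length = ks.length ∨
          (p ∈ pend → p ∉ (k :: ks).map pvPrefixOf → pvBucket E p = []) :=
        hsz.imp (fun hl => by simpa using hl) id
      have hXnot : p ∉ PySem.Set.discard pend p := fun hm =>
        ((PySem.Set.mem_discard pend p p).mp hm).2 rfl
      by_cases hkp : pvPrefixOf k = p
      · by_cases htail : p ∈ ks.map pvPrefixOf
        · -- k is not the last occurrence of p: both sides just recurse
          have hcontains : (ks.map pvPrefixOf).contains p = true := by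
            simpa [List.contains_iff_mem] using htail
          have hcl : (!(ks.map pvPrefixOf).contains (pvPrefixOf k)
              && (p :: PySem.Set.discard pend p).contains (pvPrefixOf k)) = false := by
            rw [hkp, hcontains]; simp
          have hmemr : (((pvInsL p key v its ks).2).map pvPrefixOf).contains (pvPrefixOf k) = true := by
            simp only [List.contains_iff_mem]
            exact (pv_insL_mem_prefix p key v (pvPrefixOf k) its ks hlen').mpr
              (Or.inr (by rw [hkp]; exact htail))
          have hcr : (!(((pvInsL p key v its ks).2).map pvPrefixOf).contains (pvPrefixOf k)
              && pend.contains (pvPrefixOf k)) = false := by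
            rw [hmemr]; simp
          simp only [pvInsL]
          rw [if_neg (by rw [hcontains]; simp)]
          simp only [pvWalk, hcl, hcr, Bool.false_eq_true, if_false]
          rw [ih its pend hlen' hnd hb (Or.inr (fun _ hn => absurd htail hn))]
        · -- k IS the last occurrence of p: A inserts right after k
          have hcontains : (ks.map pvPrefixOf).contains p = false := by
            simpa [List.contains_iff_mem] using htail
          simp only [pvInsL]
          rw [if_pos (by rw [hcontains, hkp]; simp)]
          -- reduce the RHS walk over it :: v :: its / k :: key :: ks
          have hcr1 : (!((key :: ks).map pvPrefixOf).contains (pvPrefixOf k)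
              && pend.contains (pvPrefixOf k)) = false := by
            simp [hkp, hp]
          have hcl : (!(ks.map pvPrefixOf).contains (pvPrefixOf k)
              && (p :: PySem.Set.discard pend p).contains (pvPrefixOf k)) = true := by
            rw [hkp, hcontains]; simp
          simp only [pvWalk, hcr1, Bool.false_eq_true, if_false, hcl, if_true]
          by_cases hpm : p ∈ pend
          · have hcr2 : (!(ks.map pvPrefixOf).contains (pvPrefixOf key)
                && pend.contains (pvPrefixOf key)) = true := by
              rw [hp, hcontains]; simp [hpm]
            simp only [hcr2, if_true]
            rw [hkp, List.erase_cons_head, pv_bucket_cons_self, hp,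
                pv_walk_drop_entry p v key E its ks _ hXnot,
                ← pv_erase_eq_discard pend p hnd]
            simp
          · have hcr2 : (!(ks.map pvPrefixOf).contains (pvPrefixOf key)
                && pend.contains (pvPrefixOf key)) = false := by
              rw [hp, hcontains]; simp [hpm]
            simp only [hcr2, Bool.false_eq_true, if_false]
            rw [hkp, List.erase_cons_head, pv_bucket_cons_self, hb hpm,
                pv_discard_not_mem pend p hpm,
                pv_walk_drop_entry p v key E its ks pend hpm]
            simp
      · -- the head's prefix q = pvPrefixOf k is not p: the two walks stay in lockstep
        simp only [pvInsL]
        rw [if_neg (by simp [hkp])]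
        have hmem_iff : (pvPrefixOf k ∈ ((pvInsL p key v its ks).2).map pvPrefixOf)
            ↔ pvPrefixOf k ∈ ks.map pvPrefixOf := by
          rw [pv_insL_mem_prefix p key v (pvPrefixOf k) its ks hlen']
          constructor
          · rintro (h1 | h2)
            · exact absurd (h1.trans hp) hkp
            · exact h2
          · exact Or.inr
        have hcontains_eq : (((pvInsL p key v its ks).2).map pvPrefixOf).contains (pvPrefixOf k)
            = (ks.map pvPrefixOf).contains (pvPrefixOf k) := by
          by_cases hm : pvPrefixOf k ∈ ks.map pvPrefixOf
          · rw [List.contains_iff_mem.mpr hm, List.contains_iff_mem.mpr (hmem_iff.mpr hm)]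
          · have e1 : (((pvInsL p key v its ks).2).map pvPrefixOf).contains (pvPrefixOf k) = false :=
              Bool.eq_false_iff.mpr (fun hcb => hm (hmem_iff.mp (List.contains_iff_mem.mp hcb)))
            have e2 : (ks.map pvPrefixOf).contains (pvPrefixOf k) = false :=
              Bool.eq_false_iff.mpr (fun hcb => hm (List.contains_iff_mem.mp hcb))
            rw [e1, e2]
        have hqeq : (p :: PySem.Set.discard pend p).contains (pvPrefixOf k)
            = pend.contains (pvPrefixOf k) := by
          by_cases hqm : pvPrefixOf k ∈ pend
          · rw [List.contains_iff_mem.mpr hqm, List.contains_iff_mem.mpr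
              (List.mem_cons_of_mem p ((PySem.Set.mem_discard pend p (pvPrefixOf k)).mpr ⟨hqm, hkp⟩))]
          · have e1 : (p :: PySem.Set.discard pend p).contains (pvPrefixOf k) = false :=
              Bool.eq_false_iff.mpr (fun hcb => hqm (by
                rcases List.mem_cons.mp (List.contains_iff_mem.mp hcb) with h1 | h2
                · exact absurd h1 hkp
                · exact ((PySem.Set.mem_discard pend p (pvPrefixOf k)).mp h2).1))
            have e2 : pend.contains (pvPrefixOf k) = false :=
              Bool.eq_false_iff.mpr (fun hcb => hqm (List.contains_iff_mem.mp hcb))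
            rw [e1, e2]
        by_cases hc : (!(ks.map pvPrefixOf).contains (pvPrefixOf k)
            && pend.contains (pvPrefixOf k)) = true
        · obtain ⟨hnotail, hqpend⟩ := (Bool.and_eq_true _ _).mp hc
          have hcl : (!(ks.map pvPrefixOf).contains (pvPrefixOf k)
              && (p :: PySem.Set.discard pend p).contains (pvPrefixOf k)) = true := by
            rw [hqeq]; exact hc
          have hcr : (!(((pvInsL p key v its ks).2).map pvPrefixOf).contains (pvPrefixOf k)
              && pend.contains (pvPrefixOf k)) = true := by
            rw [hcontains_eq]; exact hc
          simp only [pvWalk, hcl, hcr, if_true]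
          have herase : (p :: PySem.Set.discard pend p).erase (pvPrefixOf k)
              = p :: PySem.Set.discard (pend.erase (pvPrefixOf k)) p := by
            rw [List.erase_cons_tail (by simpa using Ne.symm hkp),
                pv_discard_erase pend p (pvPrefixOf k) hnd]
          rw [herase, pv_bucket_cons_ne p v key (pvPrefixOf k) hkp E,
              ih its (pend.erase (pvPrefixOf k)) hlen' (List.Nodup.erase _ hnd)
                (fun hpe => hb (fun hpm => hpe ((List.Nodup.mem_erase_iff hnd).mpr ⟨Ne.symm hkp, hpm⟩)))
                (hszt.imp id (fun hr hpm hn =>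
                  hr (List.mem_of_mem_erase hpm)
                     (fun hin => hn (by
                        rcases List.mem_map.mp hin with ⟨y, hy, hpy⟩
                        rcases List.mem_cons.mp hy with h1 | h2
                        · exact absurd (h1 ▸ hpy) hkp
                        · exact List.mem_map.mpr ⟨y, h2, hpy⟩))))]
        · have hCfalse : (!(ks.map pvPrefixOf).contains (pvPrefixOf k)
              && pend.contains (pvPrefixOf k)) = false := Bool.eq_false_iff.mpr hc
          have hcl : (!(ks.map pvPrefixOf).contains (pvPrefixOf k)
              && (p :: PySem.Set.discard pend p).contains (pvPrefixOf k)) = false := by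
            rw [hqeq]; exact hCfalse
          have hcr : (!(((pvInsL p key v its ks).2).map pvPrefixOf).contains (pvPrefixOf k)
              && pend.contains (pvPrefixOf k)) = false := by
            rw [hcontains_eq]; exact hCfalse
          simp only [pvWalk, hcl, hcr, Bool.false_eq_true, if_false]
          rw [ih its pend hlen' hnd hb
               (hszt.imp id (fun hr hpm hn =>
                  hr hpm (fun hin => hn (by
                    rcases List.mem_map.mp hin with ⟨y, hy, hpy⟩
                    rcases List.mem_cons.mp hy with h1 | h2
                    · exact absurd (h1 ▸ hpy) hkp
                    · exact List.mem_map.mpr ⟨y, h2, hpy⟩))))]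

theorem pv_bucket_len (m : List (String × String)) (q : String) :
    (pvBucket (pvEntries m) q).length
      = (m.filter (fun kv => pvPrefixOf kv.1 == q)).length := by
  induction m with
  | nil => rfl
  | cons kv rest ih =>
    simp only [pvEntries, List.map_cons, pvBucket, List.filter_cons] at *
    by_cases hq : (pvPrefixOf kv.1 == q) = true
    · simp only [hq, if_true]
      simpa using ih
    · simp only [Bool.eq_false_iff.mpr hq, Bool.false_eq_true, if_false]
      simpa using ih

theorem pv_main : ∀ (m : List (String × String)) (items keys : List String),
    keys.length ≤ items.length →
    (items.length = keys.length ∨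
      ∀ q, 2 ≤ (pvBucket (pvEntries m) q).length → q ∈ keys.map pvPrefixOf) →
    pvALoop m items keys
      = pvWalk (pvEntries m) items keys (PySem.List.dedup ((pvEntries m).map (fun e => e.1))) := by
  intro m
  induction m with
  | nil =>
    intro items keys h _
    simpa [pvEntries, pvALoop, PySem.List.dedup, PySem.Set.ofList] using (pv_walk_nil [] items keys h).symm
  | cons kv rest ih =>
    intro items keys h hsz
    obtain ⟨key, v⟩ := kv
    -- peel one iteration of the loop
    have hstep : pvALoop ((key, v) :: rest) items keys
        = pvALoop rest (pvALoop [(key, v)] items keys).1 (pvALoop [(key, v)] items keys).2 := by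
      cases hfi : (keys.reverse).findIdx? (fun it => pvPrefixOf it == pvPrefixOf key) with
      | none => simp [pvALoop, hfi]
      | some ri => simp [pvALoop, hfi]
    rw [hstep, pv_step_eq_insL key v keys items h]
    have hlen := pv_insL_len (pvPrefixOf key) key v items keys h
    have hmono : ∀ q, (pvBucket (pvEntries rest) q).length
        ≤ (pvBucket (pvEntries ((key, v) :: rest)) q).length := by
      intro q
      simp only [pvEntries, List.map_cons, pvBucket, List.filter_cons]
      split <;> simp
    have hszr : (pvInsL (pvPrefixOf key) key v items keys).1.length
          = (pvInsL (pvPrefixOf key) key v items keys).2.length ∨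
        ∀ q, 2 ≤ (pvBucket (pvEntries rest) q).length →
          q ∈ ((pvInsL (pvPrefixOf key) key v items keys).2).map pvPrefixOf := by
      rcases hsz with hl | hr
      · exact Or.inl (by rw [hlen.1, hlen.2, hl])
      · refine Or.inr (fun q h2 => ?_)
        exact (pv_insL_mem_prefix (pvPrefixOf key) key v q items keys h).mpr
          (Or.inr (hr q (le_trans h2 (hmono q))))
    rw [ih (pvInsL (pvPrefixOf key) key v items keys).1 (pvInsL (pvPrefixOf key) key v items keys).2
          (by rw [hlen.1, hlen.2]; omega) hszr]
    have hE : pvEntries ((key, v) :: rest) = (pvPrefixOf key, v, key) :: pvEntries rest := by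
      simp [pvEntries]
    have hD : PySem.List.dedup (((pvPrefixOf key, v, key) :: pvEntries rest).map (fun e => e.1))
        = pvPrefixOf key ::
          PySem.Set.discard (PySem.List.dedup ((pvEntries rest).map (fun e => e.1))) (pvPrefixOf key) := by
      simp only [List.map_cons, PySem.List.dedup_eq_ofList]
      exact PySem.Set.ofList_cons _ _
    rw [hE, hD]
    have hb : pvPrefixOf key ∉ PySem.List.dedup ((pvEntries rest).map (fun e => e.1)) →
        pvBucket (pvEntries rest) (pvPrefixOf key) = [] := by
      intro hpm
      have hnm : ∀ e ∈ pvEntries rest, ¬ (e.1 == pvPrefixOf key) = true := by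
        intro e he
        refine Bool.eq_false_iff.mp (beq_eq_false_iff_ne.mpr fun hc => hpm ?_)
        rw [PySem.List.mem_dedup]
        exact List.mem_map.mpr ⟨e, he, hc⟩
      unfold pvBucket
      rw [List.filter_eq_nil_iff.mpr hnm]
      rfl
    have hstepsz : items.length = keys.length ∨
        (pvPrefixOf key ∈ PySem.List.dedup ((pvEntries rest).map (fun e => e.1)) →
          pvPrefixOf key ∉ keys.map pvPrefixOf →
          pvBucket (pvEntries rest) (pvPrefixOf key) = []) := by
      rcases hsz with hl | hr
      · exact Or.inl hl
      · refine Or.inr (fun _ hn => ?_)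
        by_contra hne
        have h1 : 1 ≤ (pvBucket (pvEntries rest) (pvPrefixOf key)).length := by
          cases hbk : pvBucket (pvEntries rest) (pvPrefixOf key) with
          | nil => exact absurd hbk hne
          | cons _ _ => simp
        have h2 : 2 ≤ (pvBucket (pvEntries ((key, v) :: rest)) (pvPrefixOf key)).length := by
          rw [hE, pv_bucket_cons_self]
          simpa using h1
        exact hn (hr _ h2)
    exact (pv_step (pvPrefixOf key) key v rfl (pvEntries rest) keys items
      (PySem.List.dedup ((pvEntries rest).map (fun e => e.1))) h
      (PySem.List.nodup_dedup _) hb hstepsz).symm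

-- bridge: the Pre_ bucket-size condition, stated on insert_map, in the form pv_main consumes
theorem pv_pre_buckets (m : List (String × String)) (keys : List String)
    (hdisj : ∀ e ∈ m, 2 ≤ (m.filter (fun e' => pvPrefixOf e'.1 == pvPrefixOf e.1)).length →
        pvPrefixOf e.1 ∈ keys.map pvPrefixOf) :
    ∀ q, 2 ≤ (pvBucket (pvEntries m) q).length → q ∈ keys.map pvPrefixOf := by
  intro q h2
  rw [pv_bucket_len] at h2
  obtain ⟨e, he⟩ : ∃ e, e ∈ m.filter (fun kv => pvPrefixOf kv.1 == q) := by
    cases hbk : m.filter (fun kv => pvPrefixOf kv.1 == q) with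
    | nil => rw [hbk] at h2; simp at h2
    | cons x xs => exact ⟨x, by simp⟩
  have hem := List.mem_filter.mp he
  have heq : pvPrefixOf e.1 = q := by simpa using hem.2
  subst heq
  exact hdisj e hem.1 (by simpa using h2)

-- ===== VERDICT (by name: the statement is the Claim_ definition above) =====
theorem insert_additional_parameters_after_spec : Claim_equal_insert_additional_parameters_after := by
  intro items keys insert_map _ hpre
  unfold Spec_insert_additional_parameters_after
  unfold insert_additional_parameters_after insert_additional_parameters_after_alt
  exact pv_main insert_map items keys hpre.1
    (hpre.2.2.imp id (fun hr => pv_pre_buckets insert_map keys hr))
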